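-- pv_equiv track=rewrite | github.com/gridvisi/Python_workspace | 3 codewars/6 kyu/6 kyu Number of measurements to spot the counterfeit coin.py | how_many_measurements
-- ===== SOURCE A (Python) =====
-- def how_many_measurements(n,step = 0):
--     if n == 1: return 0
--     if n == 2: return step+1
--     if n == 3: return step+1
--     if n > 3:
--         if n % 3 == 0:
--             step += 1
--             return how_many_measurements(n // 3, step)
--         elif n % 3 != 0:
--             step += 1
--         return how_many_measurements(n//3+1,step)
-- ===== SOURCE B (Python) =====
-- def how_many_measurements(n, step=0):
--     if n == 1:
--         return 0
--     while n > 3: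
--         step += 1
--         n = n // 3 if n % 3 == 0 else n // 3 + 1
--     return step + 1
-- ===== Notes on version B (the rewrite author's own statement) =====
-- stated objective: simpler
-- what changed: Replaced A's tail recursion with three explicit base cases by an iterative while-loop that shrinks n to at most 3 and then returns step+1 once.
-- outside the precondition, e.g. on how_many_measurements(0, 0): A returns None, B returns 1; on how_many_measurements(-5, 0): A returns None, B returns 1
import Mathlib
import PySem

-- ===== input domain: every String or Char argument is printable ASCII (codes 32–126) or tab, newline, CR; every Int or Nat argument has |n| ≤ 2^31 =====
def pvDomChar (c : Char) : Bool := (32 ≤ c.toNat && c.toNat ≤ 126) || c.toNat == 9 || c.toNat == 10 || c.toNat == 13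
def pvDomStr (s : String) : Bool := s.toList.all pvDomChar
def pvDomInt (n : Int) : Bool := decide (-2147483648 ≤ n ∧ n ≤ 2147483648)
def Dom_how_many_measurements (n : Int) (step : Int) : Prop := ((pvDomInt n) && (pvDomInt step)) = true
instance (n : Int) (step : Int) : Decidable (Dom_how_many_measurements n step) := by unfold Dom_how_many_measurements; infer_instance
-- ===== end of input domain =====

-- B replaces A's tail recursion by an iterative while-loop (simpler decomposition); same values on n ≥ 1.

-- ===== PORT A =====
-- literal transliteration of A's recursion; the final `else 0` branch is Python's
-- implicit `return None` (n ≤ 0), excluded by Pre_.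
def how_many_measurements (n : Int) (step : Int) : Int :=
  if n = 1 then 0
  else if n = 2 then step + 1
  else if n = 3 then step + 1
  else if n > 3 then
    if PySem.Int.mod n 3 = 0 then
      how_many_measurements (PySem.Int.floordiv n 3) (step + 1)
    else
      how_many_measurements (PySem.Int.floordiv n 3 + 1) (step + 1)
  else 0
termination_by n.toNat
decreasing_by
  all_goals
    rw [PySem.Int.floordiv_eq_ediv_of_pos (by omega : (0:Int) < 3)]
    omega

-- ===== PORT B =====
-- the while-loop of Source B as a tail-recursive helper over the loop state (n, step)
def hmmLoop (n : Int) (step : Int) : Int :=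
  if n > 3 then
    hmmLoop (if PySem.Int.mod n 3 = 0 then PySem.Int.floordiv n 3
             else PySem.Int.floordiv n 3 + 1) (step + 1)
  else step + 1
termination_by n.toNat
decreasing_by
  split <;>
    (rw [PySem.Int.floordiv_eq_ediv_of_pos (by omega : (0:Int) < 3)]; omega)

def how_many_measurements_alt (n : Int) (step : Int) : Int :=
  if n = 1 then 0 else hmmLoop n step

-- ===== PRECONDITION & SPEC =====
-- Pre_ excludes n ≤ 0, on which Python A returns None (no value of the declared int type).
def Pre_how_many_measurements (n : Int) (step : Int) : Prop := 1 ≤ n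
instance (n : Int) (step : Int) : Decidable (Pre_how_many_measurements n step) := by
  unfold Pre_how_many_measurements; infer_instance
def pvWitness_how_many_measurements : Int × Int := (9, 0)
def Spec_how_many_measurements (n : Int) (step : Int) (out : Int) : Prop := out = how_many_measurements_alt n step
instance (n : Int) (step : Int) (out : Int) : Decidable (Spec_how_many_measurements n step out) := by unfold Spec_how_many_measurements; infer_instance

-- ===== CLAIM (what is proved, stated in full; the proofs are below) =====
def Claim_equal_how_many_measurements : Prop := ∀ (n : Int) (step : Int), Dom_how_many_measurements n step → Pre_how_many_measurements n step → Spec_how_many_measurements n step (how_many_measurements n step)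

-- ===== LEMMAS AND PROOFS =====

-- A's recursion and B's loop agree for every n ≥ 2 (any step)
theorem hmm_eq_loop (n step : Int) (h : 2 ≤ n) :
    how_many_measurements n step = hmmLoop n step := by
  rw [how_many_measurements, hmmLoop]
  by_cases h2 : n = 2
  · simp [h2]
  · by_cases h3 : n = 3
    · simp [h3]
    · have h4 : n > 3 := by omega
      have hdiv : PySem.Int.floordiv n 3 = n / 3 :=
        PySem.Int.floordiv_eq_ediv_of_pos (by omega)
      by_cases hm : PySem.Int.mod n 3 = 0
      · have hd : (3:Int) ∣ n := (PySem.Int.mod_eq_zero_iff_dvd n 3).mp hm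
        simp only [if_neg (by omega : ¬ n = 1), if_neg h2, if_neg h3, if_pos h4, if_pos hm]
        exact hmm_eq_loop (PySem.Int.floordiv n 3) (step + 1)
          (by rw [hdiv]; omega)
      · simp only [if_neg (by omega : ¬ n = 1), if_neg h2, if_neg h3, if_pos h4, if_neg hm]
        exact hmm_eq_loop (PySem.Int.floordiv n 3 + 1) (step + 1)
          (by rw [hdiv]; omega)
termination_by n.toNat
decreasing_by
  all_goals rw [PySem.Int.floordiv_eq_ediv_of_pos (by omega : (0:Int) < 3)]; omega

-- ===== VERDICT (by name: the statement is the Claim_ definition above) =====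
theorem how_many_measurements_spec : Claim_equal_how_many_measurements := by
  intro n step _ hpre
  unfold Spec_how_many_measurements how_many_measurements_alt
  by_cases h1 : n = 1
  · rw [how_many_measurements]; simp [h1]
  · rw [if_neg h1]
    exact hmm_eq_loop n step (by unfold Pre_how_many_measurements at hpre; omega)
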